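-- pv_equiv track=rewrite | github.com/meinantoyuriawan/code-interview-study | intv/sellingProducts.py | sellingProducts
-- ===== SOURCE A (Python) =====
-- def countMap(hashMap, schedule):
--     for num in schedule:
--         if num not in hashMap:
--             hashMap[num] = 1
--         else:
--             hashMap[num] += 1
--
-- def sellingProducts(products, m):
--     tmp_list = []
--     hashMap = {}
--     countMap(hashMap, products)
--     for key in hashMap:
--         tmp_list.append([hashMap[key], key])
--     tmp_list = sorted(tmp_list)
--     i = 0
--     while (i < len(tmp_list)):
--         if (tmp_list[i][0] <= m):
--             m -= tmp_list[i][0]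
--             tmp_list[i][0] = 0
--         if (tmp_list[i][0] == 0):
--             tmp_list.remove(tmp_list[i])
--             i -= 1
--         i += 1
--     return len(tmp_list)
-- ===== SOURCE B (Python) =====
-- def sellingProducts(products, m):
--     counts = {}
--     for x in products:
--         counts[x] = counts.get(x, 0) + 1
--     removed = 0
--     for c in sorted(counts.values()):
--         if c > m:
--             break
--         m -= c
--         removed += 1
--     return len(counts) - removed
-- ===== Notes on version B (the rewrite author's own statement) =====
-- stated objective: faster
-- what changed: Instead of building [count,key] pairs, lexicographically sorting them and deleting groups via a quadratic while-loop with list.remove, B sorts the frequency values once and makes a single greedy pass that breaks at the first frequency exceeding the remaining budget, returning len(counts) - removed.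
import Mathlib
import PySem

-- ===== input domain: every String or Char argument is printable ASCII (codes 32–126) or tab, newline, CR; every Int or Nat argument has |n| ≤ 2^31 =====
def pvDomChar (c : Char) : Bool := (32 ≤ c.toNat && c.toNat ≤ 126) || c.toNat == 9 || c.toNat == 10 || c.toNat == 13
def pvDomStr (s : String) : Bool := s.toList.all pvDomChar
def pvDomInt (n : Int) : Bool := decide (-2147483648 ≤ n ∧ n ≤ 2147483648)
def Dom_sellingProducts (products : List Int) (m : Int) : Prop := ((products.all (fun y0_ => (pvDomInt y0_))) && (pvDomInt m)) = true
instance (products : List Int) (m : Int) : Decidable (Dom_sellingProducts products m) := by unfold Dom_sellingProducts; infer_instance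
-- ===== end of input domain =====

-- B replaces A's quadratic remove-from-sorted-pair-list loop by one greedy pass over the
-- sorted frequency values (objective: faster).

-- ===== PORT A =====
-- for num in schedule: if num not in hashMap: hashMap[num] = 1 else: hashMap[num] += 1
def countMap (hashMap : PySem.Dict Int Int) (schedule : List Int) : PySem.Dict Int Int :=
  schedule.foldl
    (fun d num =>
      if d.contains num = false then d.insert num 1
      else d.insert num (d.getD num 0 + 1))   -- hashMap[num] += 1 (key present in this branch)
    hashMap

-- the while-loop of A; fuel bounds the iteration count (each iteration strictly decreases
-- len(tmp_list) - i, so fuel = initial length suffices; the fuel only makes the recursion total)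
def sellLoop : Nat → List (Int × Int) → Int → Int → List (Int × Int)
  | 0, l, _, _ => l
  | fuel+1, l, i, m =>
    if i < (l.length : Int) then
      match PySem.List.pyGet? l i with
      | none => l                              -- unreachable: 0 ≤ i < len in every reachable state
      | some e =>
        -- if tmp_list[i][0] <= m: m -= tmp_list[i][0]; tmp_list[i][0] = 0
        let s := if e.1 ≤ m then (m - e.1, l.set i.toNat (0, e.2), ((0 : Int), e.2)) else (m, l, e)
        -- if tmp_list[i][0] == 0: tmp_list.remove(tmp_list[i]); i -= 1
        if s.2.2.1 = 0 then
          match PySem.List.remove? s.2.1 s.2.2 with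
          | none => s.2.1                      -- unreachable: the element is in the list
          | some l'' => sellLoop fuel l'' (i - 1 + 1) s.1
        else sellLoop fuel s.2.1 (i + 1) s.1
    else l

def sellingProducts (products : List Int) (m : Int) : Int :=
  let hashMap := countMap PySem.Dict.empty products
  let tmp_list := hashMap.keys.foldl (fun acc key => acc ++ [(hashMap.getD key 0, key)]) []
  let tmp_sorted := PySem.List.sorted2 tmp_list (·.1) (·.2)   -- sorted(tmp_list): lexicographic on [count, key]
  ((sellLoop tmp_sorted.length tmp_sorted 0 m).length : Int)

-- ===== PORT B =====
-- for c in sorted(counts.values()): if c > m: break; m -= c; removed += 1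
def greedyRemoved : List Int → Int → Int
  | [], _ => 0
  | c :: cs, m => if c > m then 0 else 1 + greedyRemoved cs (m - c)

def sellingProducts_alt (products : List Int) (m : Int) : Int :=
  let counts := products.foldl (fun d x => d.insert x (d.getD x 0 + 1)) PySem.Dict.empty
  (counts.size : Int) - greedyRemoved (PySem.List.sorted counts.values (fun x => x) false) m

-- ===== PRECONDITION & SPEC =====
def Spec_sellingProducts (products : List Int) (m : Int) (out : Int) : Prop := out = sellingProducts_alt products m
instance (products : List Int) (m : Int) (out : Int) : Decidable (Spec_sellingProducts products m out) := by unfold Spec_sellingProducts; infer_instance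

-- ===== CLAIM (what is proved, stated in full; the proofs are below) =====
def Claim_equal_sellingProducts : Prop := ∀ (products : List Int) (m : Int), Dom_sellingProducts products m → Spec_sellingProducts products m (sellingProducts products m)

-- ===== LEMMAS AND PROOFS =====

-- number of groups A's while-loop keeps when scanning counts left to right
def survivors : List Int → Int → Int
  | [], _ => 0
  | c :: cs, m => if c ≤ m then survivors cs (m - c) else 1 + survivors cs m

-- list.remove removes the first occurrence: if it sits at index n, remove = eraseIdx n
theorem remove?_first_at {α : Type} [BEq α] [LawfulBEq α] (l : List α) (n : Nat)
    (hn : n < l.length) (a : α) (ha : l[n] = a) (hprev : ∀ j (hj : j < n), l[j] ≠ a) :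
    PySem.List.remove? l a = some (l.eraseIdx n) := by
  induction l generalizing n with
  | nil => simp at hn
  | cons x xs ih =>
    cases n with
    | zero => simp at ha; simp [ha]
    | succ k =>
      have hx : x ≠ a := by
        have := hprev 0 (Nat.succ_pos k); simpa using this
      rw [PySem.List.remove?_cons_of_ne _ hx]
      have : PySem.List.remove? xs a = some (xs.eraseIdx k) := by
        apply ih k (by simpa using hn) (by simpa using ha)
        intro j hj
        have := hprev (j+1) (by omega)
        simpa using this
      simp [this, List.eraseIdx]

theorem drop_eraseIdx_self {α : Type} (l : List α) (n : Nat) :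
    (l.eraseIdx n).drop n = l.drop (n+1) := by
  induction l generalizing n with
  | nil => simp
  | cons x xs ih =>
    cases n with
    | zero => simp [List.eraseIdx]
    | succ k => simpa [List.eraseIdx] using ih k

-- the while-loop of A keeps exactly `survivors` of the fst-components of the tail from index n
theorem sellLoop_length (fuel : Nat) :
    ∀ (l : List (Int × Int)) (n : Nat) (m : Int),
      (∀ p ∈ l, 1 ≤ p.1) → n ≤ l.length → l.length - n ≤ fuel →
      ((sellLoop fuel l (n : Int) m).length : Int) = n + survivors ((l.drop n).map (·.1)) m := by
  induction fuel with
  | zero =>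
    intro l n m _ hn hf
    have : n = l.length := by omega
    subst this
    simp [sellLoop, survivors]
  | succ fuel ih =>
    intro l n m hpos hn hf
    by_cases hlt : n < l.length
    · have hcast : ((n : Int) < (l.length : Int)) := by exact_mod_cast hlt
      have hget : PySem.List.pyGet? l (n : Int) = some l[n] := by
        rw [PySem.List.pyGet?_natCast, List.getElem?_eq_getElem hlt]
      have hmem : l[n] ∈ l := List.getElem_mem hlt
      have hpos_n : 1 ≤ l[n].1 := hpos _ hmem
      rw [List.drop_eq_getElem_cons hlt]
      simp only [sellLoop, if_pos hcast, hget, Int.toNat_natCast]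
      by_cases hcm : l[n].1 ≤ m
      · -- removal branch: the updated element (0, key) sits at index n and is removed there
        simp only [if_pos hcm]
        have hlen : n < (l.set n (0, l[n].2)).length := by simpa using hlt
        have hrem : PySem.List.remove? (l.set n ((0 : Int), l[n].2)) ((0 : Int), l[n].2)
            = some ((l.set n ((0 : Int), l[n].2)).eraseIdx n) := by
          apply remove?_first_at _ n hlen
          · simp
          · intro j hj
            have hjl : j < l.length := by omega
            rw [List.getElem_set_ne (by omega)]
            intro hEq
            have := hpos l[j] (List.getElem_mem hjl)
            rw [hEq] at this
            simp at this
        simp only [if_true, hrem, List.eraseIdx_set_eq]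
        have hstep : ((n : Int) - 1 + 1) = (n : Int) := by ring
        rw [hstep]
        have hlen' : (l.eraseIdx n).length = l.length - 1 := by
          rw [List.length_eraseIdx_of_lt hlt]
        rw [ih (l.eraseIdx n) n (m - l[n].1)
          (fun p hp => hpos p (List.mem_of_mem_eraseIdx hp)) (by omega) (by omega)]
        rw [drop_eraseIdx_self]
        simp only [List.map_cons, survivors, if_pos hcm]
      · -- keep branch: element survives, i moves on
        simp only [if_neg hcm]
        have hne : ¬ l[n].1 = 0 := by omega
        simp only [if_neg hne]
        have hcast1 : ((n : Int) + 1) = ((n + 1 : Nat) : Int) := by push_cast; ring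
        rw [hcast1, ih l (n+1) m hpos (by omega) (by omega)]
        simp only [List.map_cons, survivors, if_neg hcm]
        push_cast
        ring
    · have hEq : n = l.length := by omega
      subst hEq
      simp only [sellLoop]
      rw [if_neg (by exact_mod_cast lt_irrefl (l.length : Int))]
      simp [survivors]

-- insertion with a comparison that is total w.r.t. the first key preserves pairwise-≤ on that key
theorem insertBy_pairwise_key {α κ : Type} [LinearOrder κ] (key : α → κ)
    (before : α → α → Bool)
    (hT : ∀ a b, before a b = true → key a ≤ key b)
    (hF : ∀ a b, before a b = false → key b ≤ key a)
    (x : α) (l : List α) (hl : l.Pairwise (fun a b => key a ≤ key b)) :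
    (PySem.List.insertBy before x l).Pairwise (fun a b => key a ≤ key b) := by
  induction l with
  | nil => simp [PySem.List.insertBy]
  | cons y ys ih =>
    rw [List.pairwise_cons] at hl
    by_cases hb : before x y = true
    · have h1 : key x ≤ key y := hT _ _ hb
      simp only [PySem.List.insertBy, hb, if_true]
      refine List.Pairwise.cons ?_ (List.Pairwise.cons hl.1 hl.2)
      intro z hz
      rcases List.mem_cons.mp hz with rfl | hz
      · exact h1
      · exact le_trans h1 (hl.1 z hz)
    · have h1 : key y ≤ key x := hF _ _ (Bool.eq_false_iff.mpr hb)
      simp only [PySem.List.insertBy, hb]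
      refine List.Pairwise.cons ?_ (ih hl.2)
      intro z hz
      rcases (PySem.List.mem_insertBy before x z ys).mp hz with rfl | hz
      · exact h1
      · exact hl.1 z hz

theorem foldl_insertBy_pairwise_key {α κ : Type} [LinearOrder κ] (key : α → κ)
    (before : α → α → Bool)
    (hT : ∀ a b, before a b = true → key a ≤ key b)
    (hF : ∀ a b, before a b = false → key b ≤ key a)
    (L : List α) :
    ∀ acc, acc.Pairwise (fun a b => key a ≤ key b) →
      (L.foldl (fun acc x => PySem.List.insertBy before x acc) acc).Pairwise
        (fun a b => key a ≤ key b) := by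
  induction L with
  | nil => intro acc h; simpa using h
  | cons x L ih =>
    intro acc h
    exact ih _ (insertBy_pairwise_key key before hT hF x acc h)

-- the fst-components of Python's lexicographic sort of [count, key] pairs are nondecreasing
theorem sorted2_pairwise_fst (L : List (Int × Int)) :
    (PySem.List.sorted2 L (·.1) (·.2) false).Pairwise (fun a b => a.1 ≤ b.1) := by
  refine foldl_insertBy_pairwise_key (fun p : Int × Int => p.1)
    (fun a b => decide (a.1 < b.1) || (!decide (b.1 < a.1) && decide (a.2 < b.2)))
    ?_ ?_ L [] List.Pairwise.nil
  · intro a b hab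
    simp only [Bool.or_eq_true, Bool.and_eq_true, decide_eq_true_eq, Bool.not_eq_true',
      decide_eq_false_iff_not] at hab
    show a.1 ≤ b.1
    rcases hab with h | ⟨h, _⟩ <;> omega
  · intro a b hab
    simp only [Bool.or_eq_false_iff, Bool.and_eq_false_iff, decide_eq_false_iff_not,
      Bool.not_eq_false', decide_eq_true_eq] at hab
    show b.1 ≤ a.1
    omega

-- B's break-loop agrees with `survivors` on a nondecreasing list
theorem survivors_of_all_gt (cs : List Int) (m : Int) (h : ∀ x ∈ cs, ¬ x ≤ m) :
    survivors cs m = cs.length := by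
  induction cs with
  | nil => simp [survivors]
  | cons c cs ih =>
    have hc := h c (List.mem_cons_self)
    simp only [survivors, if_neg hc, ih (fun x hx => h x (List.mem_cons_of_mem _ hx)),
      List.length_cons]
    push_cast
    ring

theorem greedy_eq_survivors (cs : List Int) (m : Int) (h : cs.Pairwise (· ≤ ·)) :
    (cs.length : Int) - greedyRemoved cs m = survivors cs m := by
  induction cs generalizing m with
  | nil => simp [greedyRemoved, survivors]
  | cons c cs ih =>
    rw [List.pairwise_cons] at h
    by_cases hc : c ≤ m
    · have hgt : ¬ c > m := by omega
      simp only [greedyRemoved, survivors, if_neg hgt, if_pos hc, List.length_cons]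
      rw [← ih (m - c) h.2]
      push_cast
      ring
    · simp only [greedyRemoved, survivors, gt_iff_lt, if_pos (by omega : m < c), if_neg hc,
        List.length_cons]
      rw [survivors_of_all_gt cs m (fun x hx => by have := h.1 x hx; omega)]
      push_cast
      ring

-- A's counting loop builds Counter(products)
theorem countMap_eq_counter (products : List Int) :
    countMap PySem.Dict.empty products = PySem.Dict.counter products := by
  unfold countMap
  rw [PySem.List.foldl_congr_mem products _ (fun d x => d.insert x (d.getD x 0 + 1)) _ ?_]
  · exact PySem.Dict.foldl_insert_getD_add_one_eq_counter products
  · intro d x _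
    by_cases hc : d.contains x = false
    · rw [if_pos hc]
      show d.insert x 1 = d.insert x (d.getD x 0 + 1)
      rw [PySem.Dict.getD_of_not_contains d 0 hc]
      norm_num
    · rw [if_neg hc]

-- ===== VERDICT (by name: the statement is the Claim_ definition above) =====
theorem sellingProducts_spec : Claim_equal_sellingProducts := by
  intro products m _
  unfold Spec_sellingProducts sellingProducts sellingProducts_alt
  rw [countMap_eq_counter, PySem.Dict.foldl_insert_getD_add_one_eq_counter]
  simp only [PySem.List.foldl_append_singleton_eq_map, List.nil_append]
  set S := PySem.Set.ofList products with hS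
  have hkeys : (PySem.Dict.counter products).keys = S := PySem.Dict.keys_counter products
  have hLmap : (PySem.Dict.counter products).keys.map
      (fun key => ((PySem.Dict.counter products).getD key 0, key))
      = S.map (fun k => ((products.count k : Int), k)) := by
    rw [hkeys]
    exact List.map_congr_left (fun k _ => by rw [PySem.Dict.getD_counter])
  rw [hLmap]
  set L := S.map (fun k => ((products.count k : Int), k)) with hL
  set tmp := PySem.List.sorted2 L (·.1) (·.2) false with htmp
  have hvals : (PySem.Dict.counter products).values = L.map (·.1) := by
    simp only [PySem.Dict.values, PySem.Dict.items_counter, hL, List.map_map]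
    rfl
  have hsize : ((PySem.Dict.counter products).size : Int) = (L.length : Int) := by
    simp only [PySem.Dict.size, PySem.Dict.items_counter, hL, List.length_map, hS]
  have hposL : ∀ p ∈ L, 1 ≤ p.1 := by
    intro p hp
    rw [hL, List.mem_map] at hp
    obtain ⟨k, hk, rfl⟩ := hp
    have : k ∈ products := (PySem.Set.mem_ofList products k).mp hk
    have h2 : 0 < products.count k := List.count_pos_iff.mpr this
    have h3 : (1 : Int) ≤ (products.count k : Int) := by exact_mod_cast h2
    simpa using h3
  have hposT : ∀ p ∈ tmp, 1 ≤ p.1 := by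
    intro p hp
    exact hposL p ((PySem.List.sorted2_perm L (·.1) (·.2) false).mem_iff.mp hp)
  -- A's while-loop counts the survivors of the sorted counts
  have hA := sellLoop_length tmp.length tmp 0 m hposT (Nat.zero_le _) (by omega)
  simp only [Nat.cast_zero, List.drop_zero, zero_add] at hA
  rw [hA]
  -- the fst-components of the lexicographically sorted pairs are exactly sorted(values)
  have hmapfst : tmp.map (·.1) = PySem.List.sorted (L.map (·.1)) (fun x => x) false := by
    apply List.Perm.eq_of_pairwise (le := (· ≤ ·)) (fun a b _ _ h1 h2 => le_antisymm h1 h2)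
    · exact (List.pairwise_map).mpr (sorted2_pairwise_fst L)
    · simpa using PySem.List.sorted_pairwise (L.map (·.1)) (fun x => x)
    · exact ((PySem.List.sorted2_perm L (·.1) (·.2) false).map (·.1)).trans
        (PySem.List.sorted_perm (L.map (·.1)) (fun x => x) false).symm
  rw [hmapfst, hvals, hsize]
  -- B's break-loop agrees with survivors on the nondecreasing list
  have hpw : (PySem.List.sorted (L.map (·.1)) (fun x => x) false).Pairwise (· ≤ ·) := by
    simpa using PySem.List.sorted_pairwise (L.map (·.1)) (fun x => x)
  rw [← greedy_eq_survivors _ m hpw, PySem.List.length_sorted, List.length_map]
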